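-- pv_equiv track=rewrite | github.com/mima-xman/temp-delete-me2 | github_username_manager.py | _is_valid_github_username
-- ===== SOURCE A (Python) =====
-- def _is_valid_github_username(username: str) -> bool:
--     """
--     Validate GitHub username format.
--
--     Rules:
--     - 1-39 characters
--     - Alphanumeric or single hyphens
--     - Cannot start/end with hyphen
--     - No consecutive hyphens
--     """
--     if not username or len(username) > 39:
--         return False
--
--     if username.startswith("-") or username.endswith("-"):
--         return False
--
--     if "--" in username:
--         return False
--
--     for char in username:
--         if not (char.isalnum() or char == "-"):
--             return False
--
--     return True
-- ===== SOURCE B (Python) =====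
-- def _is_valid_github_username(username: str) -> bool:
--     if not username or len(username) > 39:
--         return False
--     last = len(username) - 1
--     prev = None
--     for i, ch in enumerate(username):
--         if ch == "-":
--             if i == 0 or i == last or prev == "-":
--                 return False
--         elif not ch.isalnum():
--             return False
--         prev = ch
--     return True
-- ===== Notes on version B (the rewrite author's own statement) =====
-- stated objective: alternative
-- what changed: Replaces the startswith/endswith/double-hyphen-substring multi-scan plus a separate character loop with one stateful enumerate pass that tracks the previous character and rejects hyphens at the ends or after another hyphen.
import Mathlib
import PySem

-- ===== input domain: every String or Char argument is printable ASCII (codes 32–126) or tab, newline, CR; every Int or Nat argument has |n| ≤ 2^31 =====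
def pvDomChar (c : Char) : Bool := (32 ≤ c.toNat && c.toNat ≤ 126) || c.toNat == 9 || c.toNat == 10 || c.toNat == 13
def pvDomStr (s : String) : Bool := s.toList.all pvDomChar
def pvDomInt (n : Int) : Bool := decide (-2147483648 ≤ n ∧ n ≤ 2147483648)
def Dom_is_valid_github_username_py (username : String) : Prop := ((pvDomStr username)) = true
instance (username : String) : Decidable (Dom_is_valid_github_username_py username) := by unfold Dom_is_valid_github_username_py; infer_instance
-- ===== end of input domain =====

-- B replaces A's multi-scan (startswith/endswith/'--' substring test/char loop) by one stateful pass tracking the previous character; objective: alternative decomposition.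

-- ===== PORT A =====
def is_valid_github_username_py (username : String) : Bool :=
  if PySem.Str.len username == 0 || PySem.Str.len username > 39 then false
  else if PySem.Str.startswith username "-" || PySem.Str.endswith username "-" then false
  else if PySem.Str.isIn "--" username then false
  -- for char in username: if not (char.isalnum() or char == "-"): return False / return True
  else username.toList.all (fun c => PySem.Chars.isalnum c || c == '-')

-- ===== PORT B =====
-- the 'for i, ch in enumerate(username)' loop of Source B, carrying prev
def pvAltLoop (lastIdx : Nat) : Nat → Option Char → List Char → Bool
  | _, _, [] => true
  | i, prev, c :: rest =>
    if c == '-' then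
      if i == 0 || i == lastIdx || prev == some '-' then false
      else pvAltLoop lastIdx (i + 1) (some c) rest
    else if !(PySem.Chars.isalnum c) then false
    else pvAltLoop lastIdx (i + 1) (some c) rest

def is_valid_github_username_py_alt (username : String) : Bool :=
  if username.toList.length == 0 || username.toList.length > 39 then false
  else pvAltLoop (username.toList.length - 1) 0 none username.toList

-- ===== PRECONDITION & SPEC =====
def Spec_is_valid_github_username_py (username : String) (out : Bool) : Prop := out = is_valid_github_username_py_alt username
instance (username : String) (out : Bool) : Decidable (Spec_is_valid_github_username_py username out) := by unfold Spec_is_valid_github_username_py; infer_instance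

-- ===== CLAIM (what is proved, stated in full; the proofs are below) =====
def Claim_equal_is_valid_github_username_py : Prop := ∀ (username : String), Dom_is_valid_github_username_py username → Spec_is_valid_github_username_py username (is_valid_github_username_py username)

-- ===== LEMMAS AND PROOFS =====

lemma singleton_prefix_iff (a : Char) (l : List Char) : [a] <+: l ↔ l.head? = some a := by
  cases l with
  | nil => simp
  | cons b t => simp [List.cons_prefix_cons, eq_comm]

lemma singleton_suffix_iff (a : Char) (l : List Char) : [a] <:+ l ↔ l.getLast? = some a := by
  rw [List.getLast?_eq_some_iff]
  constructor
  · rintro ⟨s, hs⟩; exact ⟨s, hs.symm⟩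
  · rintro ⟨s, hs⟩; exact ⟨s, hs.symm⟩

lemma dd_infix_cons (a : Char) (l : List Char) :
    (['-', '-'] <:+: a :: l) ↔ (a = '-' ∧ l.head? = some '-') ∨ ['-', '-'] <:+: l := by
  rw [List.infix_cons_iff, List.cons_prefix_cons, singleton_prefix_iff]
  constructor
  · rintro (⟨h1, h2⟩ | h) <;> [exact Or.inl ⟨h1.symm, h2⟩; exact Or.inr h]
  · rintro (⟨h1, h2⟩ | h) <;> [exact Or.inl ⟨h1.symm, h2⟩; exact Or.inr h]

lemma pvAltLoop_spec (lastIdx : Nat) (l : List Char) : ∀ (i : Nat) (prev : Option Char),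
    i + l.length = lastIdx + 1 →
    (pvAltLoop lastIdx i prev l = true ↔
      ((∀ c ∈ l, (PySem.Chars.isalnum c || c == '-') = true) ∧
      (i = 0 → l.head? ≠ some '-') ∧
      l.getLast? ≠ some '-' ∧
      (prev = some '-' → l.head? ≠ some '-') ∧
      ¬ (['-', '-'] <:+: l))) := by
  induction l with
  | nil => intro i prev h; simp [pvAltLoop]
  | cons c rest ih =>
    intro i prev h
    simp only [List.length_cons] at h
    by_cases hc : c = '-'
    · subst hc
      by_cases hi0 : i = 0
      · subst hi0
        simp [pvAltLoop]
      · by_cases hil : i = lastIdx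
        · have hr : rest = [] := by
            have : rest.length = 0 := by omega
            simpa using this
          subst hr
          simp [pvAltLoop, hil]
        · by_cases hp : prev = some '-'
          · simp [pvAltLoop, hi0, hp]
          · have hrne : rest ≠ [] := by
              intro hr; subst hr; simp at h; omega
            have hlast : ('-' :: rest).getLast? = rest.getLast? := by
              cases rest with
              | nil => exact absurd rfl hrne
              | cons b t => exact List.getLast?_cons_cons ..
            have hstep : pvAltLoop lastIdx i prev ('-' :: rest) =
                pvAltLoop lastIdx (i + 1) (some '-') rest := by
              simp [pvAltLoop, hi0, hil, hp]
            rw [hstep, ih (i + 1) (some '-') (by omega)]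
            rw [hlast, dd_infix_cons]
            constructor
            · rintro ⟨h1, _, h3, h4, h5⟩
              refine ⟨?_, fun h0 => absurd h0 hi0, h3, fun hpp => absurd hpp hp, ?_⟩
              · intro x hx
                rcases List.mem_cons.mp hx with rfl | hx
                · simp
                · exact h1 x hx
              · rintro (⟨_, hh⟩ | hdd)
                · exact h4 rfl hh
                · exact h5 hdd
            · rintro ⟨h1, _, h3, _, h5⟩
              refine ⟨fun x hx => h1 x (List.mem_cons_of_mem _ hx), fun h0 => by omega, h3,
                fun _ hh => h5 (Or.inl ⟨rfl, hh⟩), fun hdd => h5 (Or.inr hdd)⟩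
    · by_cases ha : PySem.Chars.isalnum c = true
      · have hstep : pvAltLoop lastIdx i prev (c :: rest) =
            pvAltLoop lastIdx (i + 1) (some c) rest := by
          simp [pvAltLoop, hc, ha]
        have hlast : ((c :: rest).getLast? = some '-') ↔ (rest.getLast? = some '-') := by
          cases rest with
          | nil => simp [hc]
          | cons b t => rw [List.getLast?_cons_cons]
        rw [hstep, ih (i + 1) (some c) (by omega)]
        rw [dd_infix_cons]
        simp only [Ne, hlast]
        constructor
        · rintro ⟨h1, _, h3, _, h5⟩
          refine ⟨?_, fun _ => by simp [hc], h3, fun _ => by simp [hc], ?_⟩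
          · intro x hx
            rcases List.mem_cons.mp hx with rfl | hx
            · simp [ha]
            · exact h1 x hx
          · rintro (⟨hcc, _⟩ | hdd)
            · exact hc hcc
            · exact h5 hdd
        · rintro ⟨h1, _, h3, _, h5⟩
          refine ⟨fun x hx => h1 x (List.mem_cons_of_mem _ hx), fun h0 => by omega, h3,
            fun hcp => absurd (Option.some_inj.mp hcp) hc, fun hdd => h5 (Or.inr hdd)⟩
      · constructor
        · intro hl
          exfalso
          simp [pvAltLoop, hc, ha] at hl
        · rintro ⟨h1, _⟩
          exfalso
          have := h1 c (List.mem_cons_self ..)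
          simp [hc, ha] at this

-- ===== VERDICT (by name: the statement is the Claim_ definition above) =====
theorem is_valid_github_username_py_spec : Claim_equal_is_valid_github_username_py := by
  intro username _
  show is_valid_github_username_py username = is_valid_github_username_py_alt username
  unfold is_valid_github_username_py is_valid_github_username_py_alt
  have hlt : username.toList.length = username.length := by simp
  by_cases hg : username.toList.length = 0 ∨ 39 < username.toList.length
  · have hA : (PySem.Str.len username == 0 || PySem.Str.len username > 39) = true := by
      simp only [PySem.Str.len_eq, Bool.or_eq_true, beq_iff_eq, decide_eq_true_eq]; omega
    have hB : (username.toList.length == 0 || username.toList.length > 39) = true := by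
      simp only [Bool.or_eq_true, beq_iff_eq, decide_eq_true_eq]; omega
    rw [if_pos hA, if_pos hB]
  · have hA : (PySem.Str.len username == 0 || PySem.Str.len username > 39) = false := by
      simp only [PySem.Str.len_eq, Bool.or_eq_false_iff, beq_eq_false_iff_ne, ne_eq,
        decide_eq_false_iff_not, not_lt]; omega
    have hB : (username.toList.length == 0 || username.toList.length > 39) = false := by
      simp only [Bool.or_eq_false_iff, beq_eq_false_iff_ne, ne_eq, decide_eq_false_iff_not,
        not_lt]; omega
    rw [hA, hB]
    simp only [Bool.false_eq_true, if_false]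
    rw [Bool.eq_iff_iff]
    rw [pvAltLoop_spec _ _ 0 none (by omega)]
    have hsw : PySem.Str.startswith username "-" = true ↔ username.toList.head? = some '-' := by
      rw [show PySem.Str.startswith username "-" = PySem.Chars.startswith username.toList ['-'] by
        simp [PySem.Str.startswith]]
      rw [PySem.Chars.startswith_iff, singleton_prefix_iff]
    have hew : PySem.Str.endswith username "-" = true ↔ username.toList.getLast? = some '-' := by
      rw [show PySem.Str.endswith username "-" = PySem.Chars.endswith username.toList ['-'] by
        simp [PySem.Str.endswith]]
      rw [PySem.Chars.endswith_iff, singleton_suffix_iff]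
    have hin : PySem.Str.isIn "--" username = true ↔ (['-', '-'] <:+: username.toList) := by
      rw [PySem.Str.isIn_iff_infix, show ("--".toList) = ['-', '-'] by decide]
    constructor
    · intro hl
      split_ifs at hl with g1 g2
      rw [Bool.not_eq_true, Bool.or_eq_false_iff] at g1
      refine ⟨?_, ?_, ?_, by simp, ?_⟩
      · intro x hx
        have := List.all_eq_true.mp hl x hx
        simpa using this
      · intro _ hh
        exact absurd (hsw.mpr hh) (by rw [g1.1]; exact Bool.false_ne_true)
      · intro hh
        exact absurd (hew.mpr hh) (by rw [g1.2]; exact Bool.false_ne_true)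
      · intro hdd
        exact g2 (hin.mpr hdd)
    · rintro ⟨h1, h2, h3, _, h5⟩
      have g1 : (PySem.Str.startswith username "-" || PySem.Str.endswith username "-") = false := by
        rw [Bool.or_eq_false_iff]
        constructor
        · by_contra hh
          exact h2 rfl (hsw.mp (by simpa using hh))
        · by_contra hh
          exact h3 (hew.mp (by simpa using hh))
      have g2 : PySem.Str.isIn "--" username = false := by
        by_contra hh
        exact h5 (hin.mp (by simpa using hh))
      rw [g1, g2]
      simp only [Bool.false_eq_true, if_false]
      exact List.all_eq_true.mpr fun x hx => h1 x hx
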